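-- pv_equiv track=rewrite | github.com/sshah2/testingAIUI | scratch_6.py | find_section_or_paragraph_code
-- ===== SOURCE A (Python) =====
-- def find_section_or_paragraph_code(cobol_lines, targets):
--     sections = {}
--     remaining_lines = []
--     current_section = None
--     current_content = []
--     called_sections = set()
--     for line in cobol_lines:
--         line_stripped = line.strip()
--         if line_stripped and line_stripped.split()[0].rstrip('.') in targets:
--             if current_section:
--                 sections[current_section] = (current_content, called_sections)
--                 current_content = []
--                 called_sections = set()
--             current_section = line_stripped.split()[0].rstrip('.')
--         elif current_section:
--             current_content.append(line)
--             if 'PERFORM' in line: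
--                 tokens = line.strip().split()
--                 if len(tokens) > 1 and tokens[1].upper() != 'UNTIL':
--                     target = tokens[1].split('.')[0]
--                     called_sections.add(target)
--         else:
--             remaining_lines.append(line)
--
--     if current_section:
--         sections[current_section] = (current_content, called_sections)
--
--     return sections, remaining_lines
-- ===== SOURCE B (Python) =====
-- def find_section_or_paragraph_code(cobol_lines, targets):
--     def header_name(line):
--         ls = line.strip()
--         if not ls:
--             return None
--         name = ls.split()[0].rstrip('.')
--         return name if name in targets else None
--
--     def next_header(k):
--         # first index >= k holding a header line (len(cobol_lines) if none)
--         while k < len(cobol_lines) and header_name(cobol_lines[k]) is None: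
--             k += 1
--         return k
--
--     def called_of(content):
--         called = set()
--         for line in content:
--             if 'PERFORM' in line:
--                 tokens = line.strip().split()
--                 if len(tokens) > 1 and tokens[1].upper() != 'UNTIL':
--                     called.add(tokens[1].split('.')[0])
--         return called
--
--     i = next_header(0)
--     remaining = cobol_lines[:i]
--     sections = {}
--     while i < len(cobol_lines):
--         name = header_name(cobol_lines[i])
--         j = next_header(i + 1)
--         content = cobol_lines[i + 1:j]
--         sections[name] = (content, called_of(content))
--         i = j
--     return sections, remaining
-- ===== Notes on version B (the rewrite author's own statement) =====
-- stated objective: alternative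
-- what changed: A's single streaming loop carrying five pieces of mutable state (sections, remaining, current_section, current_content, called_sections) is replaced by a split-at-next-header decomposition: cut off the prefix before the first header as remaining_lines, then repeatedly slice one section body off the front and compute its PERFORM set by a separate pass over that body.
-- outside the precondition, e.g. on find_section_or_paragraph_code(['... ', ' MOVE'], ['']): A returns ({}, [' MOVE']), B returns ({'': ([' MOVE'], set())}, [])
import Mathlib
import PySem

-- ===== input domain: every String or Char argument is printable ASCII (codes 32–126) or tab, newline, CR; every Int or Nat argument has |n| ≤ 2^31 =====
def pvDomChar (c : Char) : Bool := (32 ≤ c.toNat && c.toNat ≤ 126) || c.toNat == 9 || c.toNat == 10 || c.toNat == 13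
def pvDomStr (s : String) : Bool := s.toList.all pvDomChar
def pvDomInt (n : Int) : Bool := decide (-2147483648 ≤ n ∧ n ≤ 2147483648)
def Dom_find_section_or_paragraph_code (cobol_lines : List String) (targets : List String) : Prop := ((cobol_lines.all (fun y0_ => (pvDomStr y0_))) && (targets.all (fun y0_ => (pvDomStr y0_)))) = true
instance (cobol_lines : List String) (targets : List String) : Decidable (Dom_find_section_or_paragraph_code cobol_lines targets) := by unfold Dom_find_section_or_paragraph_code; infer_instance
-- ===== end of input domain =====

-- B replaces A's one streaming loop with five pieces of carried state by a split-at-next-header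
-- decomposition (remaining = prefix before the first header; then repeatedly cut one section body
-- and derive its PERFORM set by a separate pass); objective: alternative, same cost.

-- shared leaf primitive: exact port of Python's s.rstrip('.') (drop trailing '.' characters;
-- PySem has no strip-with-argument primitive, so this is hand-ported: exact for every string)
def pvRstripDots (s : String) : String :=
  String.ofList ((s.toList.reverse.dropWhile (fun c => c == '.')).reverse)

-- ===== PORT A =====
-- A's per-line update of called_sections: the body of "if 'PERFORM' in line: …" (indexes tokens[1]
-- only under the length test, so getD 1 "" is exact; split on '.' is never none)
def pvA_calledUpd (called : PySem.Set String) (line : String) : PySem.Set String :=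
  if PySem.Str.isIn "PERFORM" line then
    let tokens := PySem.Str.split₀ (PySem.Str.strip line)
    if decide (1 < tokens.length) && !(PySem.Str.upper (tokens.getD 1 "") == "UNTIL") then
      PySem.Set.add called (((PySem.Str.split? (tokens.getD 1 "") ".").getD []).headD "")
    else called
  else called

-- state = (sections, remaining_lines, current_section, current_content, called_sections);
-- current_section is Option String and Python's "if current_section:" is falsy both for None and
-- for the empty string, hence the 's == ""' tests. line_stripped.split()[0] is read with headD ""
-- (exact: a non-empty stripped line splits into at least one token).
def pvA_step (targets : List String)
    (st : PySem.Dict String (List String × PySem.Set String) × List String × Option String × List String × PySem.Set String)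
    (line : String) :
    PySem.Dict String (List String × PySem.Set String) × List String × Option String × List String × PySem.Set String :=
  let d := st.1; let rem := st.2.1; let cur := st.2.2.1; let cont := st.2.2.2.1; let called := st.2.2.2.2
  let ls := PySem.Str.strip line
  if !(ls == "") && targets.contains (pvRstripDots ((PySem.Str.split₀ ls).headD "")) then
    match cur with
    | some s =>
      if s == "" then (d, rem, some (pvRstripDots ((PySem.Str.split₀ ls).headD "")), cont, called)
      else (d.insert s (cont, called), rem, some (pvRstripDots ((PySem.Str.split₀ ls).headD "")),
            ([] : List String), (PySem.Set.empty : PySem.Set String))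
    | none => (d, rem, some (pvRstripDots ((PySem.Str.split₀ ls).headD "")), cont, called)
  else
    match cur with
    | some s =>
      if s == "" then (d, rem ++ [line], cur, cont, called)
      else (d, rem, cur, cont ++ [line], pvA_calledUpd called line)
    | none => (d, rem ++ [line], cur, cont, called)

def find_section_or_paragraph_code (cobol_lines : List String) (targets : List String) : (List (String × List String × List String)) × List String :=
  let st := cobol_lines.foldl (pvA_step targets)
    ((PySem.Dict.empty : PySem.Dict String (List String × PySem.Set String)), ([] : List String),
     (none : Option String), ([] : List String), (PySem.Set.empty : PySem.Set String))
  let d := match st.2.2.1 with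
    | some s => if s == "" then st.1 else st.1.insert s (st.2.2.2.1, st.2.2.2.2)
    | none => st.1
  (d.items, st.2.1)

-- ===== PORT B =====
def pvHeaderName? (targets : List String) (line : String) : Option String :=
  let ls := PySem.Str.strip line
  if ls == "" then none
  else
    let name := pvRstripDots ((PySem.Str.split₀ ls).headD "")
    if targets.contains name then some name else none

def pvSplitBody (targets : List String) : List String → List String × List String
  | [] => ([], [])
  | l :: t =>
    if (pvHeaderName? targets l).isSome then ([], l :: t)
    else
      let p := pvSplitBody targets t
      (l :: p.1, p.2)

theorem pvSplitBody_snd_len (targets : List String) (l : List String) :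
    (pvSplitBody targets l).2.length ≤ l.length := by
  induction l with
  | nil => simp [pvSplitBody]
  | cons x t ih =>
    simp only [pvSplitBody]
    split
    · simp
    · simpa using Nat.le_succ_of_le ih

def pvCalledOf (content : List String) : PySem.Set String :=
  content.foldl (fun called line =>
    if PySem.Str.isIn "PERFORM" line then
      let tokens := PySem.Str.split₀ (PySem.Str.strip line)
      if decide (1 < tokens.length) && !(PySem.Str.upper (tokens.getD 1 "") == "UNTIL") then
        PySem.Set.add called (((PySem.Str.split? (tokens.getD 1 "") ".").getD []).headD "")
      else called
    else called) PySem.Set.empty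

def pvBuildB (targets : List String) (d : PySem.Dict String (List String × PySem.Set String)) :
    List String → PySem.Dict String (List String × PySem.Set String)
  | [] => d
  | h :: t =>
    let name := (pvHeaderName? targets h).getD ""
    let p := pvSplitBody targets t
    pvBuildB targets (d.insert name (p.1, pvCalledOf p.1)) p.2
termination_by l => l.length
decreasing_by
  exact Nat.lt_succ_of_le (pvSplitBody_snd_len targets t)

def find_section_or_paragraph_code_alt (cobol_lines : List String) (targets : List String) : (List (String × List String × List String)) × List String :=
  let p := pvSplitBody targets cobol_lines
  ((pvBuildB targets PySem.Dict.empty p.2).items, p.1)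

-- ===== PRECONDITION & SPEC =====
-- Pre_ excludes only inputs where "" is a target AND some line's first token consists entirely of
-- dots: there A's falsy-string current_section ("" fails "if current_section:") silently drops that
-- section and diverts its lines to remaining_lines — an accident of string truthiness that B,
-- which treats such a line as an ordinary header, does not reproduce.
def Pre_find_section_or_paragraph_code (cobol_lines : List String) (targets : List String) : Prop :=
  "" ∈ targets →
    ∀ l ∈ cobol_lines, ¬ (PySem.Str.strip l ≠ "" ∧
      pvRstripDots ((PySem.Str.split₀ (PySem.Str.strip l)).headD "") = "")
instance (cobol_lines : List String) (targets : List String) : Decidable (Pre_find_section_or_paragraph_code cobol_lines targets) := by unfold Pre_find_section_or_paragraph_code; infer_instance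

def pvWitness_find_section_or_paragraph_code : List String × List String :=
  (["ID DIVISION.", "A SECTION.", "    PERFORM B.", "B SECTION.", "    MOVE X TO Y."], ["A", "B"])

def Spec_find_section_or_paragraph_code (cobol_lines : List String) (targets : List String) (out : (List (String × List String × List String)) × List String) : Prop := out = find_section_or_paragraph_code_alt cobol_lines targets
instance (cobol_lines : List String) (targets : List String) (out : (List (String × List String × List String)) × List String) : Decidable (Spec_find_section_or_paragraph_code cobol_lines targets out) := by unfold Spec_find_section_or_paragraph_code; infer_instance

-- ===== CLAIM (what is proved, stated in full; the proofs are below) =====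
def Claim_equal_find_section_or_paragraph_code : Prop := ∀ (cobol_lines : List String) (targets : List String), Dom_find_section_or_paragraph_code cobol_lines targets → Pre_find_section_or_paragraph_code cobol_lines targets → Spec_find_section_or_paragraph_code cobol_lines targets (find_section_or_paragraph_code cobol_lines targets)

-- ===== LEMMAS AND PROOFS =====

-- A's final flush, at the dict level
def pvFinish (st : PySem.Dict String (List String × PySem.Set String) × List String × Option String × List String × PySem.Set String) :
    PySem.Dict String (List String × PySem.Set String) × List String :=
  (match st.2.2.1 with
   | some s => if s == "" then st.1 else st.1.insert s (st.2.2.2.1, st.2.2.2.2)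
   | none => st.1, st.2.1)

theorem pvA_test_eq (targets : List String) (line : String) :
    (!(PySem.Str.strip line == "") &&
      targets.contains (pvRstripDots ((PySem.Str.split₀ (PySem.Str.strip line)).headD ""))) =
    (pvHeaderName? targets line).isSome := by
  unfold pvHeaderName?
  by_cases h : PySem.Str.strip line = "" <;> simp [h]
  split <;> simp_all

theorem pvHeaderName_some_elim (targets : List String) (l : String) (nm : String)
    (hnm : pvHeaderName? targets l = some nm) :
    PySem.Str.strip l ≠ "" ∧ targets.contains nm = true ∧
      pvRstripDots ((PySem.Str.split₀ (PySem.Str.strip l)).headD "") = nm := by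
  unfold pvHeaderName? at hnm
  by_cases h0 : PySem.Str.strip l = "" <;> simp [h0] at hnm
  obtain ⟨hmem, heq⟩ := hnm
  subst heq
  exact ⟨h0, by simpa using hmem, by simp⟩

theorem pvCalledOf_eq (body : List String) :
    pvCalledOf body = body.foldl pvA_calledUpd PySem.Set.empty := rfl

-- In a live section s (s ≠ ""), A's loop over lines finishes exactly as B does after inserting the
-- accumulated section and continuing on the tail returned by pvSplitBody.
theorem pvA_loop_some (targets : List String) (lines : List String) :
    ∀ (d : PySem.Dict String (List String × PySem.Set String)) (rem : List String) (s : String)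
      (cont : List String) (called : PySem.Set String), s ≠ "" →
      (∀ l ∈ lines, pvHeaderName? targets l ≠ some "") →
      pvFinish (lines.foldl (pvA_step targets) (d, rem, some s, cont, called)) =
        (pvBuildB targets
          (d.insert s (cont ++ (pvSplitBody targets lines).1,
            (pvSplitBody targets lines).1.foldl pvA_calledUpd called))
          (pvSplitBody targets lines).2, rem) := by
  induction lines with
  | nil =>
    intro d rem s cont called hs _
    simp [pvSplitBody, pvBuildB, pvFinish, hs]
  | cons l t ih =>
    intro d rem s cont called hs hH
    by_cases hh : (pvHeaderName? targets l).isSome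
    · -- header line: flush current section, start a new one
      obtain ⟨nm, hnm⟩ := Option.isSome_iff_exists.mp hh
      have hnm' : nm ≠ "" := fun h => hH l (by simp) (h ▸ hnm)
      obtain ⟨h0, hin, hname⟩ := pvHeaderName_some_elim targets l nm hnm
      have hcond : (!(PySem.Str.strip l == "") &&
          targets.contains (pvRstripDots ((PySem.Str.split₀ (PySem.Str.strip l)).headD ""))) = true := by
        rw [pvA_test_eq]; exact hh
      simp only [List.foldl_cons, pvA_step, hcond]
      rw [if_pos trivial, if_neg (by simp [hs]), hname]
      rw [ih _ _ _ _ _ hnm' (fun x hx => hH x (by simp [hx]))]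
      conv_rhs => rw [pvSplitBody]
      rw [if_pos hh]
      simp [pvBuildB, hnm, pvCalledOf_eq]
    · -- body line: append to content, update called
      have hcond : (!(PySem.Str.strip l == "") &&
          targets.contains (pvRstripDots ((PySem.Str.split₀ (PySem.Str.strip l)).headD ""))) = false := by
        rw [pvA_test_eq]; simpa using hh
      simp only [List.foldl_cons, pvA_step, hcond, Bool.false_eq_true, if_false]
      rw [if_neg (by simp [hs])]
      rw [ih _ _ _ _ _ hs (fun x hx => hH x (by simp [hx]))]
      conv_rhs => rw [pvSplitBody]
      rw [if_neg (by simp [hh])]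
      simp

-- Before any header: A only moves lines to remaining_lines; once the first header appears the
-- previous lemma takes over. (cont/called are the initial empties throughout.)
theorem pvA_loop_none (targets : List String) (lines : List String) :
    ∀ (d : PySem.Dict String (List String × PySem.Set String)) (rem : List String),
      (∀ l ∈ lines, pvHeaderName? targets l ≠ some "") →
      pvFinish (lines.foldl (pvA_step targets) (d, rem, none, [], PySem.Set.empty)) =
        (pvBuildB targets d (pvSplitBody targets lines).2,
          rem ++ (pvSplitBody targets lines).1) := by
  induction lines with
  | nil =>
    intro d rem _
    simp [pvSplitBody, pvBuildB, pvFinish]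
  | cons l t ih =>
    intro d rem hH
    by_cases hh : (pvHeaderName? targets l).isSome
    · obtain ⟨nm, hnm⟩ := Option.isSome_iff_exists.mp hh
      have hnm' : nm ≠ "" := fun h => hH l (by simp) (h ▸ hnm)
      obtain ⟨h0, hin, hname⟩ := pvHeaderName_some_elim targets l nm hnm
      have hcond : (!(PySem.Str.strip l == "") &&
          targets.contains (pvRstripDots ((PySem.Str.split₀ (PySem.Str.strip l)).headD ""))) = true := by
        rw [pvA_test_eq]; exact hh
      simp only [List.foldl_cons, pvA_step, hcond]
      rw [if_pos trivial, hname]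
      rw [pvA_loop_some targets t _ _ _ _ _ hnm' (fun x hx => hH x (by simp [hx]))]
      conv_rhs => rw [pvSplitBody]
      rw [if_pos hh]
      simp [pvBuildB, hnm, pvCalledOf_eq]
    · have hcond : (!(PySem.Str.strip l == "") &&
          targets.contains (pvRstripDots ((PySem.Str.split₀ (PySem.Str.strip l)).headD ""))) = false := by
        rw [pvA_test_eq]; simpa using hh
      simp only [List.foldl_cons, pvA_step, hcond, Bool.false_eq_true, if_false]
      rw [ih _ _ (fun x hx => hH x (by simp [hx]))]
      conv_rhs => rw [pvSplitBody]
      rw [if_neg (by simp [hh])]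
      simp

-- ===== VERDICT (by name: the statement is the Claim_ definition above) =====
theorem find_section_or_paragraph_code_spec : Claim_equal_find_section_or_paragraph_code := by
  intro cobol_lines targets _ hpre
  unfold Spec_find_section_or_paragraph_code
  have hH : ∀ l ∈ cobol_lines, pvHeaderName? targets l ≠ some "" := by
    intro l hl h
    obtain ⟨h0, hin, hname⟩ := pvHeaderName_some_elim targets l "" h
    exact hpre (by simpa using hin) l hl ⟨h0, hname⟩
  have hmain := pvA_loop_none targets cobol_lines PySem.Dict.empty [] hH
  unfold find_section_or_paragraph_code find_section_or_paragraph_code_alt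
  simp only [pvFinish] at hmain
  rw [Prod.ext_iff] at hmain
  simp only [] at hmain ⊢
  rw [hmain.1, hmain.2]
  simp
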